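-- pv_equiv track=rewrite | github.com/thumbe12856/competitive-programming | cf/_contest/719_Div3/4/solve.py | solve
-- ===== SOURCE A (Python) =====
-- from collections import Counter
--
-- def solve(N, nums):
--     for i in range(1, N, 1):
--         nums[i] -= i + nums[0]
--     nums[0] = 0
--     cn = Counter(nums)
--     ans = 0
--     for c in cn:
--         if cn[c] > 1:
--             if cn[c] == 2:
--                 ans += 1
--             else:
--                 ans += (1 + cn[c] - 1) * (cn[c] - 1) // 2
--     return ans
-- ===== SOURCE B (Python) =====
-- def solve(N, nums):
--     for i in range(1, N, 1):
--         nums[i] -= i + nums[0]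
--     nums[0] = 0
--     ans = 0
--     seen = {}
--     for v in nums:
--         ans += seen.get(v, 0)
--         seen[v] = seen.get(v, 0) + 1
--     return ans
-- ===== Notes on version B (the rewrite author's own statement) =====
-- stated objective: simpler
-- what changed: Replaced the two-phase Counter-then-binomial counting (tabulate all counts, then sum C(c,2) per distinct key with a special case for c=2) by a single incremental pass that adds seen.get(v,0) to the answer before incrementing seen[v]; the transform loop is kept identical.
import Mathlib
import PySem

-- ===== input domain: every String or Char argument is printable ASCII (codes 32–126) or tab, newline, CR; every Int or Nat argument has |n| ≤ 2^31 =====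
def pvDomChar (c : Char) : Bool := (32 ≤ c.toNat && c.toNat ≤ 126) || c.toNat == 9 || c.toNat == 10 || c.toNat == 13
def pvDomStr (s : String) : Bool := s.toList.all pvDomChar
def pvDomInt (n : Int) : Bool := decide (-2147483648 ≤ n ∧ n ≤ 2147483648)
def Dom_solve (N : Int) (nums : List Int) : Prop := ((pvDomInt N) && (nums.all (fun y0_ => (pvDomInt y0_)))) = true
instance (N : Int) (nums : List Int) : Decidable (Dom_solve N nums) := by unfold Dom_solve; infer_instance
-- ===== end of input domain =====

-- B replaces the Counter-then-binomial tabulation by a single incremental pass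
-- (add seen.get(v,0), then increment seen[v]); the in-place transform loop is identical in A and B.
-- Equivalence is about the RETURN value only: both Pythons mutate `nums` in place (identically).

-- ===== PORT A =====
-- shared transform (identical Python code in A and B): nums[i] -= i + nums[0] for i in range(1,N), then nums[0] = 0
def pyTransform (N : Int) (nums : List Int) : List Int :=
  let ns := (PySem.List.pyRange 1 N 1).foldl
      (fun ns i => ns.set i.toNat ((PySem.List.pyGet? ns i).getD 0 - (i + (PySem.List.pyGet? ns 0).getD 0))) nums
  match ns with
  | [] => []
  | _ :: t => 0 :: t

def solve (N : Int) (nums : List Int) : Int :=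
  let ys := pyTransform N nums
  let cn := PySem.Dict.counter ys
  cn.keys.foldl (fun ans c =>
    if cn.getD c 0 > 1 then
      if cn.getD c 0 = 2 then ans + 1
      else ans + PySem.Int.floordiv ((1 + cn.getD c 0 - 1) * (cn.getD c 0 - 1)) 2
    else ans) 0

-- ===== PORT B =====
def solve_alt (N : Int) (nums : List Int) : Int :=
  let ys := pyTransform N nums
  (ys.foldl (fun (p : Int × PySem.Dict Int Int) v =>
      (p.1 + p.2.getD v 0, p.2.insert v (p.2.getD v 0 + 1))) (0, PySem.Dict.empty)).1

-- ===== PRECONDITION & SPEC =====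
-- Pre_ excludes exactly the inputs where Python A raises IndexError: empty nums (nums[0]) or N > len(nums).
def Pre_solve (N : Int) (nums : List Int) : Prop := nums ≠ [] ∧ N ≤ nums.length
instance (N : Int) (nums : List Int) : Decidable (Pre_solve N nums) := by unfold Pre_solve; infer_instance
def pvWitness_solve : Int × List Int := (3, [2, 5, 6])

def Spec_solve (N : Int) (nums : List Int) (out : Int) : Prop := out = solve_alt N nums
instance (N : Int) (nums : List Int) (out : Int) : Decidable (Spec_solve N nums out) := by unfold Spec_solve; infer_instance

-- ===== CLAIM (what is proved, stated in full; the proofs are below) =====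
def Claim_equal_solve : Prop := ∀ (N : Int) (nums : List Int), Dom_solve N nums → Pre_solve N nums → Spec_solve N nums (solve N nums)

-- ===== LEMMAS AND PROOFS =====

-- the pairs contributed by a value occurring k times, exactly as A computes it
def payoff (k : Int) : Int :=
  if k > 1 then (if k = 2 then 1 else PySem.Int.floordiv ((1 + k - 1) * (k - 1)) 2) else 0

theorem payoff_succ (k : Int) (hk : 0 ≤ k) : payoff (k + 1) = payoff k + k := by
  unfold payoff
  rcases Int.lt_or_le k 2 with h | h
  · interval_cases k <;> decide
  · have h1 : ¬ k + 1 = 2 := by omega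
    have h2 : ¬ k = 2 ∨ k = 2 := by omega
    rw [if_pos (by omega), if_neg h1, if_pos (by omega)]
    rw [PySem.Int.floordiv_eq_ediv_of_pos (by norm_num), PySem.Int.floordiv_eq_ediv_of_pos (by norm_num)]
    obtain ⟨m, hm⟩ : Even (k * (k - 1)) := Int.even_mul_pred_self k
    have e1 : (1 + (k + 1) - 1) * (k + 1 - 1) = 2 * (m + k) := by linear_combination hm
    have e2 : (1 + k - 1) * (k - 1) = 2 * m := by linear_combination hm
    rw [e1, e2, Int.mul_ediv_cancel_left _ (by norm_num), Int.mul_ediv_cancel_left _ (by norm_num)]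
    split_ifs with h3
    · subst h3; omega
    · omega

theorem foldA_eq (f : Int → Int) : ∀ (l : List Int) (a : Int),
    l.foldl (fun ans c =>
      if f c > 1 then
        if f c = 2 then ans + 1
        else ans + PySem.Int.floordiv ((1 + f c - 1) * (f c - 1)) 2
      else ans) a
    = a + (l.map (fun c => payoff (f c))).sum := by
  intro l
  induction l with
  | nil => simp
  | cons x t ih =>
      intro a
      simp only [List.foldl_cons, List.map_cons, List.sum_cons, ih]
      unfold payoff
      split_ifs <;> ring

-- the seen-dict of B's loop is exactly the counter of the processed prefix
theorem Bsnd : ∀ (l : List Int) (a : Int) (d : PySem.Dict Int Int),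
    (l.foldl (fun (p : Int × PySem.Dict Int Int) v =>
        (p.1 + p.2.getD v 0, p.2.insert v (p.2.getD v 0 + 1))) (a, d)).2
    = l.foldl (fun d x => d.insert x (d.getD x 0 + 1)) d := by
  intro l
  induction l with
  | nil => intro a d; rfl
  | cons x t ih => intro a d; simp only [List.foldl_cons, ih]

-- replacing f by g, which agrees except for adding k at one element occurring once
theorem sum_map_update (v k : Int) (f g : Int → Int) :
    ∀ (s : List Int), s.Nodup → v ∈ s → (∀ c ∈ s, c ≠ v → g c = f c) → g v = f v + k →
    (s.map g).sum = (s.map f).sum + k := by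
  intro s
  induction s with
  | nil => intro _ hv; cases hv
  | cons x t ih =>
      intro hnd hv hagree hupd
      simp only [List.map_cons, List.sum_cons]
      rcases List.mem_cons.mp hv with rfl | hvt
      · have ht : ∀ c ∈ t, g c = f c := by
          intro c hc
          exact hagree c (List.mem_cons_of_mem _ hc) (fun h => (List.nodup_cons.mp hnd).1 (h ▸ hc))
        rw [hupd, List.map_congr_left ht]
        ring
      · have hx : g x = f x := by
          refine hagree x List.mem_cons_self (fun h => ?_)
          exact (List.nodup_cons.mp hnd).1 (h ▸ hvt)
        rw [hx, ih (List.nodup_cons.mp hnd).2 hvt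
              (fun c hc hcv => hagree c (List.mem_cons_of_mem _ hc) hcv) hupd]
        ring

theorem B_eq : ∀ (ys : List Int),
    (ys.foldl (fun (p : Int × PySem.Dict Int Int) v =>
        (p.1 + p.2.getD v 0, p.2.insert v (p.2.getD v 0 + 1))) (0, PySem.Dict.empty)).1
    = ((PySem.Set.ofList ys).map (fun c => payoff ((ys.count c : Int)))).sum := by
  intro ys
  induction ys using List.reverseRecOn with
  | nil => rfl
  | append_singleton ys v ih =>
      rw [List.foldl_append, List.foldl_cons, List.foldl_nil]
      have hsnd : (ys.foldl (fun (p : Int × PySem.Dict Int Int) v =>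
          (p.1 + p.2.getD v 0, p.2.insert v (p.2.getD v 0 + 1))) (0, PySem.Dict.empty)).2
          = PySem.Dict.counter ys := by
        rw [Bsnd, PySem.Dict.foldl_insert_getD_add_one_eq_counter]
      simp only [hsnd, ih, PySem.Dict.getD_counter, PySem.Set.ofList_append_singleton]
      by_cases hv : v ∈ ys
      · rw [PySem.Set.add_of_mem ((PySem.Set.mem_ofList ys v).mpr hv)]
        refine (sum_map_update v (ys.count v : Int)
          (fun c => payoff ((ys.count c : Int)))
          (fun c => payoff (((ys ++ [v]).count c : Int)))
          (PySem.Set.ofList ys) (PySem.Set.nodup_ofList ys)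
          ((PySem.Set.mem_ofList ys v).mpr hv) ?_ ?_).symm
        · intro c _ hcv
          have h0 : List.count c [v] = 0 := List.count_eq_zero.mpr (by simp [hcv])
          simp [List.count_append, h0]
        · have h1 : List.count v [v] = 1 := by simp
          simp only [List.count_append, h1]
          push_cast
          exact payoff_succ _ (by positivity)
      · rw [PySem.Set.add_of_not_mem (fun h => hv ((PySem.Set.mem_ofList _ _).mp h)),
            List.map_append, List.sum_append]
        have hcnt0 : ys.count v = 0 := List.count_eq_zero.mpr hv
        have hterm : ((([v] : List Int).map (fun c => payoff (((ys ++ [v]).count c : Int)))).sum) = 0 := by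
          simp [List.count_append, hcnt0, payoff]
        rw [hterm, hcnt0]
        have hmap : (PySem.Set.ofList ys).map (fun c => payoff (((ys ++ [v]).count c : Int)))
            = (PySem.Set.ofList ys).map (fun c => payoff ((ys.count c : Int))) := by
          refine List.map_congr_left (fun c hc => ?_)
          have hcv : c ≠ v := fun h => hv (h ▸ (PySem.Set.mem_ofList _ _).mp hc)
          have h0 : List.count c [v] = 0 := List.count_eq_zero.mpr (by simp [hcv])
          simp [List.count_append, h0]
        rw [hmap]
        push_cast
        ring

theorem ports_agree (N : Int) (nums : List Int) : solve N nums = solve_alt N nums := by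
  unfold solve solve_alt
  rw [B_eq]
  rw [foldA_eq (fun c => (PySem.Dict.counter (pyTransform N nums)).getD c 0)]
  simp only [PySem.Dict.getD_counter, PySem.Dict.keys_counter, zero_add]

-- ===== VERDICT (by name: the statement is the Claim_ definition above) =====
theorem solve_spec : Claim_equal_solve := by
  intro N nums _ _
  unfold Spec_solve
  exact ports_agree N nums
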